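-- pv_equiv track=rewrite | github.com/jakedugi/corp_speech_risk_dataset | src/corp_speech_risk_dataset/fully_interpretable/features.py | _window_proximity_count
-- ===== SOURCE A (Python) =====
-- from typing import Any, Dict, List, Set, Tuple, Optional
--
-- def _window_proximity_count(
--     tokens: List[str], set_a: set[str], set_b: set[str], radius: int = 3
-- ) -> int:
--     """Count how many times tokens from set_a appear within radius of tokens from set_b."""
--     if not tokens or not set_a or not set_b:
--         return 0
--
--     # Find indices of tokens in each set
--     idx_a = [i for i, t in enumerate(tokens) if t in set_a]
--     idx_b = [i for i, t in enumerate(tokens) if t in set_b]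
--
--     if not idx_a or not idx_b:
--         return 0
--
--     count = 0
--     j = 0
--     for i in idx_a:
--         # Advance j while B[j] < i - radius
--         while j < len(idx_b) and idx_b[j] < i - radius:
--             j += 1
--         k = j
--         while k < len(idx_b) and idx_b[k] <= i + radius:
--             count += 1
--             k += 1
--
--     return count
-- ===== SOURCE B (Python) =====
-- def _window_proximity_count(tokens, set_a, set_b, radius=3):
--     """Count how many times tokens from set_a appear within radius of tokens from set_b."""
--     idx_b = [j for j, t in enumerate(tokens) if t in set_b]
--     return sum(1
--                for i, t in enumerate(tokens) if t in set_a
--                for j in idx_b if abs(j - i) <= radius)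
-- ===== Notes on version B (the rewrite author's own statement) =====
-- stated objective: simpler
-- what changed: Replaces the stateful two-pointer sweep (persistent j pointer, two inner while loops, three early-return guards) with a direct double comprehension: for every set_a index, count the set_b indices within radius via abs(j-i) <= radius; no guards or pointers needed.
import Mathlib
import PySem

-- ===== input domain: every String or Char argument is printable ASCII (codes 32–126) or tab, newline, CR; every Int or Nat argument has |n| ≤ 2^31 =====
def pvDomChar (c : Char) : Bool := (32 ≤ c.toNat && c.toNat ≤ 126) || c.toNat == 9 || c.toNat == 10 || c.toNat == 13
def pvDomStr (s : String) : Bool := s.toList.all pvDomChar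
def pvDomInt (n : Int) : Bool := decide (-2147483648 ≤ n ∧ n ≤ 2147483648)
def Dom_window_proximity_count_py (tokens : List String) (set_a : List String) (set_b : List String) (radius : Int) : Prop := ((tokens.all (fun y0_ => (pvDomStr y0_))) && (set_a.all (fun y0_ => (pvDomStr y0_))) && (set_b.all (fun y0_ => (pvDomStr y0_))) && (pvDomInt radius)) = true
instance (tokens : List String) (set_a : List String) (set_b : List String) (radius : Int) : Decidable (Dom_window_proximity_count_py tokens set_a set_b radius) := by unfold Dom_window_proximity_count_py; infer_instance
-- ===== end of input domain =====

-- B replaces A's stateful two-pointer sweep by a plain double comprehension (per set_a index,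
-- count set_b indices with abs(j-i) <= radius); objective: simpler, not faster.

-- ===== PORT A =====
-- [i for i, t in enumerate(tokens) if t in s]  (shared by both Pythons verbatim)
def pvIdx (tokens : List String) (s : List String) : List Int :=
  (PySem.List.enumerate tokens 0).filterMap (fun p => if s.contains p.2 then some p.1 else none)

-- while j < len(idx_b) and idx_b[j] < i - radius: j += 1
def pvAdvance (B : List Int) (lo : Int) (j : Nat) : Nat :=
  if h : j < B.length then
    if B[j] < lo then pvAdvance B lo (j + 1) else j
  else j
termination_by B.length - j

-- k = j; while k < len(idx_b) and idx_b[k] <= i + radius: count += 1; k += 1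
def pvRun (B : List Int) (hi : Int) (k : Nat) (c : Int) : Int :=
  if h : k < B.length then
    if B[k] ≤ hi then pvRun B hi (k + 1) (c + 1) else c
  else c
termination_by B.length - k

-- for i in idx_a: … (state: count, persistent pointer j)
def pvLoopA (B : List Int) (radius : Int) : List Int → Int × Nat → Int × Nat
  | [], s => s
  | i :: rest, (c, j) =>
      let j' := pvAdvance B (i - radius) j
      pvLoopA B radius rest (pvRun B (i + radius) j' c, j')

def window_proximity_count_py (tokens : List String) (set_a : List String) (set_b : List String) (radius : Int) : Int :=
  if tokens = [] ∨ set_a = [] ∨ set_b = [] then 0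
  else if pvIdx tokens set_a = [] ∨ pvIdx tokens set_b = [] then 0
  else (pvLoopA (pvIdx tokens set_b) radius (pvIdx tokens set_a) (0, 0)).1

-- ===== PORT B =====
def window_proximity_count_py_alt (tokens : List String) (set_a : List String) (set_b : List String) (radius : Int) : Int :=
  let idx_b := pvIdx tokens set_b
  (pvIdx tokens set_a).foldl
    (fun acc i => idx_b.foldl (fun a j => if |j - i| ≤ radius then a + 1 else a) acc) 0

-- ===== PRECONDITION & SPEC =====
def Spec_window_proximity_count_py (tokens : List String) (set_a : List String) (set_b : List String) (radius : Int) (out : Int) : Prop := out = window_proximity_count_py_alt tokens set_a set_b radius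
instance (tokens : List String) (set_a : List String) (set_b : List String) (radius : Int) (out : Int) : Decidable (Spec_window_proximity_count_py tokens set_a set_b radius out) := by unfold Spec_window_proximity_count_py; infer_instance

-- ===== CLAIM (what is proved, stated in full; the proofs are below) =====
def Claim_equal_window_proximity_count_py : Prop := ∀ (tokens : List String) (set_a : List String) (set_b : List String) (radius : Int), Dom_window_proximity_count_py tokens set_a set_b radius → Spec_window_proximity_count_py tokens set_a set_b radius (window_proximity_count_py tokens set_a set_b radius)

-- ===== LEMMAS AND PROOFS =====

-- inner foldl of B counts with countP
theorem pv_foldl_count (L : List Int) (i radius : Int) (acc : Int) :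
    L.foldl (fun a j => if |j - i| ≤ radius then a + 1 else a) acc
      = acc + (L.countP (fun j => decide (|j - i| ≤ radius)) : Int) := by
  induction L generalizing acc with
  | nil => simp
  | cons x l ih =>
      simp only [List.foldl_cons, List.countP_cons, ih]
      by_cases h : |x - i| ≤ radius <;> simp [h] <;> ring

theorem pv_run_eq (B : List Int) (hi : Int) (k : Nat) (c : Int) :
    pvRun B hi k c = c + (((B.drop k).takeWhile (fun x => decide (x ≤ hi))).length : Int) := by
  induction k, c using pvRun.induct (B := B) (hi := hi) with
  | case1 k c h hle ih =>
      rw [pvRun, dif_pos h, if_pos hle, ih]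
      rw [List.drop_eq_getElem_cons h, List.takeWhile_cons, if_pos (by simpa using hle)]
      simp; ring
  | case2 k c h hle =>
      rw [pvRun, dif_pos h, if_neg hle]
      rw [List.drop_eq_getElem_cons h, List.takeWhile_cons, if_neg (by simpa using hle)]
      simp
  | case3 k c h =>
      rw [pvRun, dif_neg h]
      rw [List.drop_eq_nil_of_le (by omega)]
      simp

-- on a ≤-sorted list, takeWhile (≤ hi) captures every element ≤ hi
theorem pv_takeWhile_sorted (L : List Int) (hi : Int) (hs : L.Pairwise (· ≤ ·)) :
    (L.takeWhile (fun x => decide (x ≤ hi))).length = L.countP (fun x => decide (x ≤ hi)) := by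
  induction L with
  | nil => simp
  | cons a l ih =>
      rcases List.pairwise_cons.mp hs with ⟨ha, hl⟩
      by_cases h : a ≤ hi
      · simp [h, ih hl]
      · rw [List.takeWhile_cons, if_neg (by simpa using h)]
        simp only [List.countP_cons, List.length_nil]
        rw [List.countP_eq_zero.mpr]
        · simp [h]
        · intro x hx
          simpa using by have := ha x hx; omega

-- invariant preserved by pvAdvance
theorem pv_advance_inv (B : List Int) (lo : Int) (j : Nat) :
    (∀ x ∈ B.take j, x < lo) → ∀ x ∈ B.take (pvAdvance B lo j), x < lo := by
  induction j using pvAdvance.induct (B := B) (lo := lo) with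
  | case1 j h hlt ih =>
      intro hP
      rw [pvAdvance, dif_pos h, if_pos hlt]
      apply ih
      intro x hx
      rw [List.take_add_one] at hx
      rcases List.mem_append.mp hx with hx | hx
      · exact hP x hx
      · simp [List.getElem?_eq_getElem h] at hx; omega
  | case2 j h hlt =>
      intro hP
      rw [pvAdvance, dif_pos h, if_neg hlt]; exact hP
  | case3 j h =>
      intro hP
      rw [pvAdvance, dif_neg h]; exact hP

-- pvAdvance stops at the end or at an element ≥ lo
theorem pv_advance_stop (B : List Int) (lo : Int) (j : Nat) :
    B.length ≤ pvAdvance B lo j ∨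
      ∃ h : pvAdvance B lo j < B.length, lo ≤ B[pvAdvance B lo j] := by
  induction j using pvAdvance.induct (B := B) (lo := lo) with
  | case1 j h hlt ih => rw [pvAdvance, dif_pos h, if_pos hlt]; exact ih
  | case2 j h hlt =>
      rw [pvAdvance, dif_pos h, if_neg hlt]
      exact Or.inr ⟨h, by omega⟩
  | case3 j h =>
      rw [pvAdvance, dif_neg h]; left; omega

-- one outer-loop step of A computes the full window count for i
theorem pv_step (B : List Int) (radius i c : Int) (j : Nat)
    (hs : B.Pairwise (· ≤ ·)) (hP : ∀ x ∈ B.take j, x < i - radius) :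
    pvRun B (i + radius) (pvAdvance B (i - radius) j) c
      = c + (B.countP (fun x => decide (|x - i| ≤ radius)) : Int) := by
  set j' := pvAdvance B (i - radius) j with hj'
  have hP' : ∀ x ∈ B.take j', x < i - radius := pv_advance_inv B (i - radius) j hP
  have hge : ∀ x ∈ B.drop j', i - radius ≤ x := by
    rcases pv_advance_stop B (i - radius) j with hend | ⟨hlt, hge0⟩
    · rw [← hj'] at *
      rw [List.drop_eq_nil_of_le hend]; intro x hx; simp at hx
    · rw [← hj'] at *
      intro x hx
      rw [List.drop_eq_getElem_cons hlt] at hx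
      rcases List.mem_cons.mp hx with rfl | hx
      · exact hge0
      · have hsd : (B.drop j').Pairwise (· ≤ ·) := hs.sublist (List.drop_sublist _ _)
        rw [List.drop_eq_getElem_cons hlt] at hsd
        rcases List.pairwise_cons.mp hsd with ⟨hhead, _⟩
        exact le_trans hge0 (hhead x hx)
  rw [pv_run_eq]
  congr 1
  have hds : (B.drop j').Pairwise (· ≤ ·) := hs.sublist (List.drop_sublist _ _)
  rw [pv_takeWhile_sorted _ _ hds]
  have hsplit : B.countP (fun x => decide (|x - i| ≤ radius))
      = (B.take j').countP (fun x => decide (|x - i| ≤ radius))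
        + (B.drop j').countP (fun x => decide (|x - i| ≤ radius)) := by
    conv_lhs => rw [← List.take_append_drop j' B]
    rw [List.countP_append]
  have htake : (B.take j').countP (fun x => decide (|x - i| ≤ radius)) = 0 := by
    rw [List.countP_eq_zero]
    intro x hx
    have := hP' x hx
    simp only [decide_eq_true_eq, abs_le]
    omega
  have hdrop : (B.drop j').countP (fun x => decide (|x - i| ≤ radius))
      = (B.drop j').countP (fun x => decide (x ≤ i + radius)) := by
    apply List.countP_congr
    intro x hx
    have := hge x hx
    simp only [decide_eq_true_eq, abs_le]
    omega
  rw [hsplit, htake, hdrop]; push_cast; ring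

-- A's outer loop equals B's double fold
theorem pv_loop_eq (B : List Int) (radius : Int) (la : List Int)
    (hla : la.Pairwise (· ≤ ·)) (hs : B.Pairwise (· ≤ ·)) :
    ∀ (c : Int) (j : Nat), (∀ x ∈ B.take j, ∀ i ∈ la, x < i - radius) →
    (pvLoopA B radius la (c, j)).1
      = la.foldl (fun acc i => B.foldl (fun a x => if |x - i| ≤ radius then a + 1 else a) acc) c := by
  induction la with
  | nil => intro c j _; simp [pvLoopA]
  | cons i rest ih =>
      intro c j hP
      rcases List.pairwise_cons.mp hla with ⟨hirest, hrest⟩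
      simp only [pvLoopA, List.foldl_cons]
      rw [ih hrest _ (pvAdvance B (i - radius) j) ?_]
      · rw [pv_step B radius i c j hs (fun x hx => hP x hx i (List.mem_cons_self))]
        rw [pv_foldl_count]
      · intro x hx i2 hi2
        have hx' := pv_advance_inv B (i - radius) j
          (fun y hy => hP y hy i (List.mem_cons_self)) x hx
        have := hirest i2 hi2
        omega

-- index lists are sorted
theorem pv_idx_sorted (tokens s : List String) : (pvIdx tokens s).Pairwise (· ≤ ·) := by
  unfold pvIdx
  have h := PySem.List.pairwise_lt_enumerate (xs := tokens) (s := 0)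
  apply List.Pairwise.imp (fun {a b} h => le_of_lt h)
  rw [List.pairwise_filterMap]
  apply h.imp
  intro p q hpq x hx y hy
  by_cases hc : s.contains p.2
  · rw [if_pos hc] at hx
    by_cases hc' : s.contains q.2
    · rw [if_pos hc'] at hy
      simp only [Option.some.injEq] at hx hy
      omega
    · rw [if_neg hc'] at hy
      exact absurd hy (by simp)
  · rw [if_neg hc] at hx
    exact absurd hx (by simp)

theorem pv_alt_eq_fold (tokens set_a set_b : List String) (radius : Int) :
    window_proximity_count_py_alt tokens set_a set_b radius
      = (pvIdx tokens set_a).foldl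
          (fun acc i => (pvIdx tokens set_b).foldl
            (fun a j => if |j - i| ≤ radius then a + 1 else a) acc) 0 := rfl

theorem pv_alt_zero_of_idxb_nil (tokens set_a set_b : List String) (radius : Int)
    (h : pvIdx tokens set_b = []) :
    window_proximity_count_py_alt tokens set_a set_b radius = 0 := by
  rw [pv_alt_eq_fold, h]
  induction pvIdx tokens set_a with
  | nil => rfl
  | cons a l ih => simpa using ih

theorem pv_idx_nil_of_set_nil (tokens : List String) : pvIdx tokens [] = [] := by
  unfold pvIdx
  simp

-- ===== VERDICT (by name: the statement is the Claim_ definition above) =====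
theorem window_proximity_count_py_spec : Claim_equal_window_proximity_count_py := by
  intro tokens set_a set_b radius _
  unfold Spec_window_proximity_count_py
  unfold window_proximity_count_py
  split
  · next hguard =>
      rcases hguard with h | h | h
      · subst h
        rw [pv_alt_zero_of_idxb_nil]
        unfold pvIdx; simp [PySem.List.enumerate_nil]
      · subst h
        rw [pv_alt_eq_fold, pv_idx_nil_of_set_nil]; rfl
      · subst h
        rw [pv_alt_zero_of_idxb_nil _ _ _ _ (pv_idx_nil_of_set_nil tokens)]
  · split
    · next hnil =>
        rcases hnil with h | h
        · rw [pv_alt_eq_fold, h]; rfl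
        · rw [pv_alt_zero_of_idxb_nil _ _ _ _ h]
    · rw [pv_alt_eq_fold]
      exact pv_loop_eq (pvIdx tokens set_b) radius (pvIdx tokens set_a)
        (pv_idx_sorted tokens set_a) (pv_idx_sorted tokens set_b) 0 0
        (by intro x hx; simp at hx)
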